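-- pv_equiv track=rewrite | github.com/EnesErcin/Convolutional_Neural_Network_wFPGA | IEEE_Multipication_Addition Emulator_wPython/Functions.py | packtoarray
-- ===== SOURCE A (Python) =====
-- def packtoarray(val,val_len):
--     assert(type(val) == int)                    # This function packs the number to binary array
--     binary_represent = list(str(bin(val)))
--
--     lenofpresentvalues = len(binary_represent)
--
--     till = val_len - (lenofpresentvalues-2)
--
--     mynewlist = binary_represent[val_len-1:0]       ##>>>>>>>>>>>>>>>This does not feel rigth (does not cause probelems thoguh(Probably))
--     #binary_represent[lenofpresentvalues-2:till]
--
--     for x in range (0,val_len):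
--         if(x<lenofpresentvalues-2):
--             # 0'b represented as
--             mynewlist.append(binary_represent[(lenofpresentvalues-1)-x])
--         else:
--             mynewlist.append("0")
--
--         # Appended with undesirable order so I switch
--         reversed_list = list(reversed(mynewlist))
--
--     return val_len, reversed_list
-- ===== SOURCE B (Python) =====
-- def packtoarray(val, val_len):
--     assert(type(val) == int)
--     binary_represent = list(str(bin(val)))
--     bits = len(binary_represent) - 2
--     k = min(val_len, bits)
--     result = ["0"] * (val_len - k) + binary_represent[len(binary_represent) - k:]
--     return val_len, result
-- ===== Notes on version B (the rewrite author's own statement) =====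
-- stated objective: faster
-- what changed: Replaces the element-by-element append loop, which rebuilds the reversed list on every iteration, by a closed-form construction: a computed count of '0' padding concatenated with one slice of the bin-string characters.
import Mathlib
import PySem

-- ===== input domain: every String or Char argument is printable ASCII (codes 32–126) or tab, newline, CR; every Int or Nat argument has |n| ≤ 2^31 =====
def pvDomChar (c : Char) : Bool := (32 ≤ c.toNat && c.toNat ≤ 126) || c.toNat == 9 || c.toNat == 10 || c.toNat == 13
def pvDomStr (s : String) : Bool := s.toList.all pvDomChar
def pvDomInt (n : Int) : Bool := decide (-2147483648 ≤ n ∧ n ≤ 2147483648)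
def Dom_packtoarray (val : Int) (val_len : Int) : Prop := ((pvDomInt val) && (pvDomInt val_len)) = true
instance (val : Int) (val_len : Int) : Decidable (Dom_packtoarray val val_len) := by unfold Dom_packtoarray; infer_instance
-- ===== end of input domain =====

-- B replaces A's append-then-re-reverse loop by a closed-form pad count plus one slice (simpler; return value only).

-- ===== PORT A =====
-- literal transliteration of A; the loop state is (mynewlist, reversed_list);
-- reversed_list starts as [] only as a placeholder: Python leaves it unbound and
-- raises when the loop never runs, which Pre_packtoarray (val_len ≥ 1) excludes.
def packtoarray (val : Int) (val_len : Int) : Int × List String :=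
  let binary_represent : List String :=
    (PySem.Int.toBinChars0b val).map (fun c => String.ofList [c])
  let lenofpresentvalues : Int := binary_represent.length
  let mynewlist : List String :=
    PySem.List.slice binary_represent (some (val_len - 1)) (some 0)
  let st :=
    (PySem.List.pyRange 0 val_len 1).foldl
      (fun (s : List String × List String) (x : Int) =>
        let m :=
          if x < lenofpresentvalues - 2 then
            s.1 ++ [PySem.List.pyGetD binary_represent ((lenofpresentvalues - 1) - x) ""]
          else
            s.1 ++ ["0"]
        (m, m.reverse))
      (mynewlist, [])
  (val_len, st.2)

-- ===== PORT B =====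
def packtoarray_alt (val : Int) (val_len : Int) : Int × List String :=
  let binary_represent : List String :=
    (PySem.Int.toBinChars0b val).map (fun c => String.ofList [c])
  let bits : Int := binary_represent.length - 2
  let k : Int := min val_len bits
  let result : List String :=
    List.replicate (val_len - k).toNat "0" ++
      PySem.List.slice binary_represent (some ((binary_represent.length : Int) - k)) none
  (val_len, result)

-- ===== PRECONDITION & SPEC =====
-- For val_len ≤ 0 the loop body never runs and A raises UnboundLocalError on reversed_list.
def Pre_packtoarray (val : Int) (val_len : Int) : Prop := 1 ≤ val_len
instance (val : Int) (val_len : Int) : Decidable (Pre_packtoarray val val_len) := by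
  unfold Pre_packtoarray; infer_instance
def pvWitness_packtoarray : Int × Int := (5, 8)

def Spec_packtoarray (val : Int) (val_len : Int) (out : Int × List String) : Prop :=
  out = packtoarray_alt val val_len
instance (val : Int) (val_len : Int) (out : Int × List String) : Decidable (Spec_packtoarray val val_len out) := by
  unfold Spec_packtoarray; infer_instance

-- ===== CLAIM (what is proved, stated in full; the proofs are below) =====
def Claim_equal_packtoarray : Prop := ∀ (val : Int) (val_len : Int), Dom_packtoarray val val_len → Pre_packtoarray val val_len → Spec_packtoarray val val_len (packtoarray val val_len)

-- ===== LEMMAS AND PROOFS =====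

-- A's loop: append one element per step, keeping the reverse of the accumulator.
theorem loopA (f : Int → String) (xs : List Int) (l r : List String) :
    (xs.foldl (fun (s : List String × List String) x =>
        ((s.1 ++ [f x]), (s.1 ++ [f x]).reverse)) (l, r)) =
      (l ++ xs.map f, if xs.isEmpty then r else (l ++ xs.map f).reverse) := by
  induction xs generalizing l r with
  | nil => simp
  | cons x xs ih =>
    simp only [List.foldl_cons, List.map_cons, ih]
    cases xs <;> simp

-- bin(val) always has at least the two characters '0','b'.
theorem binlen2 (val : Int) : 2 ≤ (PySem.Int.toBinChars0b val).length := by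
  unfold PySem.Int.toBinChars0b; split <;> simp


theorem core (bc : List String) (n : Nat) (hL : 2 ≤ bc.length) :
    ((List.range n).map (fun (i : Nat) => if (0:Int) + (i:Int) < (bc.length:Int) - 2 then PySem.List.pyGetD bc ((bc.length:Int) - 1 - ((0:Int) + (i:Int))) "" else "0")).reverse
    = List.replicate (n - min n (bc.length - 2)) "0" ++ bc.drop (bc.length - min n (bc.length - 2)) := by
  set K := min n (bc.length - 2) with hK
  clear_value K
  have hKn : K ≤ n := by omega
  have hKL : K ≤ bc.length - 2 := by omega
  apply List.ext_getElem
  · simp; omega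
  intro i hi hi'
  have hin : i < n := by simpa using hi
  rw [List.getElem_reverse, List.getElem_append]
  simp only [List.length_map, List.length_range, List.length_replicate]
  rw [List.getElem_map, List.getElem_range]
  by_cases hz : i < n - K
  · have hKeq : K = bc.length - 2 := by omega
    rw [dif_pos hz, List.getElem_replicate]
    have hc : ¬ ((0:Int) + ((n - 1 - i : Nat):Int) < (bc.length:Int) - 2) := by omega
    rw [if_neg hc]
  · have h1 : n - 1 - i < K := by omega
    have hc : (0:Int) + ((n - 1 - i : Nat):Int) < (bc.length:Int) - 2 := by omega
    rw [dif_neg hz, List.getElem_drop, if_pos hc,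
      PySem.List.pyGetD_eq_getElem bc "" (by omega) (by omega)]
    congr 1
    omega

-- ===== VERDICT (by name: the statements are the Claim_ definitions above) =====
theorem packtoarray_spec : Claim_equal_packtoarray := by
  intro val val_len _ hpre
  have hpre' : (1:Int) ≤ val_len := hpre
  unfold Spec_packtoarray packtoarray packtoarray_alt
  dsimp only
  set bc := (PySem.Int.toBinChars0b val).map (fun c => String.ofList [c]) with hbc
  have hL : 2 ≤ bc.length := by
    rw [hbc, List.length_map]; exact binlen2 val
  have hsl : PySem.List.slice bc (some (val_len - 1)) (some 0) = [] := by
    rw [PySem.List.slice_toNat bc (by omega) (by omega)]; simp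
  rw [hsl]
  have hstep : (fun (s : List String × List String) (x : Int) =>
      ((if x < (bc.length:Int) - 2 then
          s.1 ++ [PySem.List.pyGetD bc ((bc.length:Int) - 1 - x) ""]
        else s.1 ++ ["0"]),
       (if x < (bc.length:Int) - 2 then
          s.1 ++ [PySem.List.pyGetD bc ((bc.length:Int) - 1 - x) ""]
        else s.1 ++ ["0"]).reverse))
      = (fun (s : List String × List String) (x : Int) =>
          (s.1 ++ [if x < (bc.length:Int) - 2 then PySem.List.pyGetD bc ((bc.length:Int) - 1 - x) "" else "0"],
           (s.1 ++ [if x < (bc.length:Int) - 2 then PySem.List.pyGetD bc ((bc.length:Int) - 1 - x) "" else "0"]).reverse)) := by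
    funext s x
    by_cases h : x < (bc.length:Int) - 2 <;> simp [h]
  rw [hstep, loopA]
  have hne : (PySem.List.pyRange 0 val_len 1).isEmpty = false := by
    rw [PySem.List.pyRange_one_cons (by omega)]; rfl
  rw [hne]
  simp only [Bool.false_eq_true, if_false, List.nil_append]
  refine Prod.ext rfl ?_
  dsimp only
  rw [PySem.List.pyRange_one, List.map_map,
    PySem.List.slice_from bc (by omega)]
  have hn0 : (val_len - 0).toNat = val_len.toNat := by omega
  have hrep : ((val_len:Int) - min val_len ((bc.length:Int) - 2)).toNat
      = val_len.toNat - min val_len.toNat (bc.length - 2) := by omega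
  have hdrop : ((bc.length:Int) - min val_len ((bc.length:Int) - 2)).toNat
      = bc.length - min val_len.toNat (bc.length - 2) := by omega
  rw [hn0, hrep, hdrop]
  have := core bc val_len.toNat hL
  convert this using 2
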